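-- pv_equiv track=rewrite | github.com/soyoungxxx/Algorithm | 프로그래머스/2/388352. 비밀 코드 해독/비밀 코드 해독.py | solution
-- ===== SOURCE A (Python) =====
-- from itertools import combinations
--
-- def solution(n, q, ans):
--     answer = 0
--
--     arr = list(range(1, n+1))
--
--     for arrComb in combinations(arr, 5) :
--         i = 0
--         flag = True
--         for ansCount in ans :
--             count = len(set(arrComb) & set(q[i]))
--             if (count != ansCount) :
--                 flag = False
--                 break
--             i += 1
--         if (flag) :
--             answer += 1
--     return answer
-- ===== SOURCE B (Python) =====
-- def solution(n, q, ans):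
--     member = [set(x) for x in q[:len(ans)]]
--
--     def dfs(v, k, counts):
--         # branch-and-bound: overlap counts only grow, so overshooting prunes the subtree
--         if any(c > a for c, a in zip(counts, ans)):
--             return 0
--         if k == 0:
--             return 1 if counts == ans else 0
--         total = 0
--         for w in range(v, n + 1):
--             total += dfs(w + 1, k - 1,
--                          [c + (w in s) for c, s in zip(counts, member)])
--         return total
--
--     return dfs(1, 5, [0] * len(member))
-- ===== Notes on version B (the rewrite author's own statement) =====
-- stated objective: faster
-- what changed: Replaces A's flat enumeration of itertools.combinations with per-query set intersections by a recursive branch-and-bound search that picks the 5 numbers in increasing order, carries the per-query overlap counts incrementally (one set-membership test per query per picked number), and prunes any branch whose counts already exceed the target.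
-- outside the precondition, e.g. on solution(5, [[1]], [0, 0]): A returns 0, B returns 0
import Mathlib
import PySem

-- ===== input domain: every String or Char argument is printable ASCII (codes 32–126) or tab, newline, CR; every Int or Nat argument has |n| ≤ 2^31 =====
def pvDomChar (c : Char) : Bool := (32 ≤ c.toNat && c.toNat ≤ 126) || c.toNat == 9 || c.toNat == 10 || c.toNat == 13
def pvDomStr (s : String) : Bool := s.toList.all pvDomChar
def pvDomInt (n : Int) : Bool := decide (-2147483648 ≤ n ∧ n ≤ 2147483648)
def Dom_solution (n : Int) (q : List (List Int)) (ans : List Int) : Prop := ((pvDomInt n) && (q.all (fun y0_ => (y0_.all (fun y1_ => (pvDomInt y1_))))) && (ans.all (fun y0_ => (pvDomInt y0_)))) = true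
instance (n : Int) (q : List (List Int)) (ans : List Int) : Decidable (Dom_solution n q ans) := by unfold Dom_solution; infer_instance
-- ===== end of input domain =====

-- B replaces A's flat enumeration of itertools.combinations with set intersections per query
-- by a recursive branch-and-bound search that picks the 5 numbers in increasing order,
-- carries the per-query overlap counts incrementally, and prunes any branch whose counts
-- already exceed the target (objective: alternative).

-- ===== PORT A =====
-- inner 'for ansCount in ans' loop with its early break, carrying the index i
def solInner (arrComb : List Int) (q : List (List Int)) : Int → List Int → Bool
  | _, [] => true
  | i, ansCount :: rest =>
      let count := PySem.Set.len (PySem.Set.inter (PySem.Set.ofList arrComb)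
                     (PySem.Set.ofList (PySem.List.pyGetD q i [])))
      if count ≠ ansCount then false else solInner arrComb q (i + 1) rest

def solution (n : Int) (q : List (List Int)) (ans : List Int) : Int :=
  let arr := PySem.List.pyRange 1 (n + 1) 1
  (PySem.List.combinations arr 5).foldl
    (fun answer arrComb => if solInner arrComb q 0 ans then answer + 1 else answer) 0

-- ===== PORT B =====
-- dfs(v, k, counts): k numbers still to pick, all from v..n; returns the number of
-- completions whose final per-query counts equal ans.  'w in s' (a Python bool added
-- to an int) is ported as 'if … then 1 else 0'; Python's countdown int k is the Nat k.
def dfsB (n : Int) (member : List (PySem.Set Int)) (ans : List Int) (k : Nat) (v : Int)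
    (counts : List Int) : Int :=
  if (counts.zip ans).any (fun p => decide (p.1 > p.2)) then 0
  else
    match k with
    | 0 => if counts = ans then 1 else 0
    | k' + 1 =>
        (PySem.List.pyRange v (n + 1) 1).foldl
          (fun total w => total + dfsB n member ans k' (w + 1)
            ((counts.zip member).map (fun p => p.1 + if PySem.Set.contains p.2 w then 1 else 0)))
          0

def solution_alt (n : Int) (q : List (List Int)) (ans : List Int) : Int :=
  let member := (PySem.List.slice q none (some (ans.length : Int))).map PySem.Set.ofList
  dfsB n member ans 5 1 (List.replicate member.length 0)

-- ===== PRECONDITION & SPEC =====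
-- Pre_ excludes ans longer than q when at least one 5-combination exists (n ≥ 5): there
-- Python A raises IndexError on q[i] as soon as some combination matches all of q's
-- overlap counts (and returns an accidental 0 otherwise); B slices q to the queries ans
-- constrains and returns a value on all such inputs.
def Pre_solution (n : Int) (q : List (List Int)) (ans : List Int) : Prop :=
  ans.length ≤ q.length ∨ n < 5

instance (n : Int) (q : List (List Int)) (ans : List Int) : Decidable (Pre_solution n q ans) := by
  unfold Pre_solution; infer_instance

def pvWitness_solution : Int × List (List Int) × List Int := (6, [[1, 2], [3]], [2, 1])

def Spec_solution (n : Int) (q : List (List Int)) (ans : List Int) (out : Int) : Prop :=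
  out = solution_alt n q ans

instance (n : Int) (q : List (List Int)) (ans : List Int) (out : Int) : Decidable (Spec_solution n q ans out) := by
  unfold Spec_solution; infer_instance

-- ===== CLAIM (what is proved, stated in full; the proofs are below) =====
def Claim_equal_solution : Prop := ∀ (n : Int) (q : List (List Int)) (ans : List Int), Dom_solution n q ans → Pre_solution n q ans → Spec_solution n q ans (solution n q ans)

-- ===== LEMMAS AND PROOFS =====

-- one dfs step on the counts vector
def ovB (member : List (PySem.Set Int)) (counts : List Int) (w : Int) : List Int :=
  (counts.zip member).map (fun p => p.1 + if PySem.Set.contains p.2 w then 1 else 0)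

-- the final counts vector of a full combination
def FB (member : List (PySem.Set Int)) (counts : List Int) (comb : List Int) : List Int :=
  comb.foldl (ovB member) counts

theorem length_ovB (member : List (PySem.Set Int)) (c : List Int) (w : Int)
    (hc : c.length = member.length) : (ovB member c w).length = member.length := by
  simp [ovB, hc]

theorem getD_ovB (member : List (PySem.Set Int)) (c : List Int) (w : Int) (j : Nat)
    (hc : c.length = member.length) (hj : j < member.length) :
    (ovB member c w).getD j 0
      = c.getD j 0 + if PySem.Set.contains (member.getD j []) w then 1 else 0 := by
  have hj' : j < c.length := by omega
  simp [ovB, List.getD, hj, List.getElem_zip, hc]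

theorem FB_spec (member : List (PySem.Set Int)) :
    ∀ (comb c : List Int), c.length = member.length →
    (FB member c comb).length = member.length ∧
    ∀ j : Nat, j < member.length →
      (FB member c comb).getD j 0
        = c.getD j 0 + (comb.countP (fun x => PySem.Set.contains (member.getD j []) x) : Int) := by
  intro comb
  induction comb with
  | nil => intro c hc; exact ⟨hc, fun j _ => by simp [FB]⟩
  | cons w comb ih =>
      intro c hc
      have hlen := length_ovB member c w hc
      have h2 := ih (ovB member c w) hlen
      refine ⟨h2.1, fun j hj => ?_⟩
      have := h2.2 j hj
      rw [FB, List.foldl_cons] at *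
      rw [this, getD_ovB member c w j hc hj, List.countP_cons]
      by_cases h : PySem.Set.contains (member.getD j []) w = true <;> simp <;> ring

-- the pruning test, index form
theorem prune_exists {cs ans : List Int}
    (h : (cs.zip ans).any (fun p => decide (p.1 > p.2)) = true) :
    ∃ j : Nat, j < cs.length ∧ j < ans.length ∧ ans.getD j 0 < cs.getD j 0 := by
  rcases List.any_eq_true.mp h with ⟨p, hp, hgt⟩
  rcases List.mem_iff_getElem.mp hp with ⟨j, hj, hpj⟩
  have hjc : j < cs.length := by
    have := hj; simp [List.length_zip] at this; omega
  have hja : j < ans.length := by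
    have := hj; simp [List.length_zip] at this; omega
  refine ⟨j, hjc, hja, ?_⟩
  have hz : (cs.zip ans)[j] = (cs[j], ans[j]) := List.getElem_zip
  rw [hz] at hpj
  have hlt2 : ans[j] < cs[j] := by
    rw [← hpj] at hgt; simpa using hgt
  simpa [List.getD_eq_getElem?_getD, List.getElem?_eq_getElem, hjc, hja] using hlt2

-- under pruning no completion reaches ans
theorem prune_kills (member : List (PySem.Set Int)) (ans : List Int) (c comb : List Int)
    (hc : c.length = member.length)
    (h : (c.zip ans).any (fun p => decide (p.1 > p.2)) = true) :
    ¬ FB member c comb = ans := by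
  intro hF
  rcases prune_exists h with ⟨j, hjc, hja, hlt⟩
  have hs := FB_spec member comb c hc
  have hjm : j < member.length := by omega
  have hlen : ans.length = member.length := by rw [← hF, hs.1]
  have := hs.2 j hjm
  rw [hF] at this
  have hcnt : (0 : Int) ≤ (comb.countP (fun x => PySem.Set.contains (member.getD j []) x) : Int) := by positivity
  omega

-- splitting the count over combinations of a range by the first chosen element
theorem countP_comb_split (n : Int) (k : Nat) (P : List Int → Bool) :
    ∀ (fuel : Nat) (v : Int), ((n + 1) - v).toNat ≤ fuel →
    (PySem.List.combinations (PySem.List.pyRange v (n + 1) 1) (k + 1)).countP P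
      = ((PySem.List.pyRange v (n + 1) 1).map
          (fun w => (PySem.List.combinations (PySem.List.pyRange (w + 1) (n + 1) 1) k).countP
            (fun comb => P (w :: comb)))).sum := by
  intro fuel
  induction fuel with
  | zero =>
      intro v hv
      have : n + 1 ≤ v := by omega
      rw [PySem.List.pyRange_one_eq_nil this]
      simp [PySem.List.combinations_nil_succ]
  | succ fuel ih =>
      intro v hv
      by_cases hlt : v < n + 1
      · rw [PySem.List.pyRange_one_cons hlt, PySem.List.combinations_cons_succ,
            List.countP_append, List.countP_map, List.map_cons, List.sum_cons,
            ih (v + 1) (by omega)]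
        rfl
      · have : n + 1 ≤ v := by omega
        rw [PySem.List.pyRange_one_eq_nil this]
        simp [PySem.List.combinations_nil_succ]

-- cast a sum of casts
theorem sum_map_cast (l : List Int) (h : Int → Nat) :
    (l.map (fun w => ((h w : Nat) : Int))).sum = (((l.map h).sum : Nat) : Int) := by
  induction l with
  | nil => simp
  | cons x l ih => simp [ih]

-- the main invariant: dfs counts exactly the matching completions
theorem dfsB_eq (n : Int) (member : List (PySem.Set Int)) (ans : List Int) :
    ∀ (k : Nat) (v : Int) (c : List Int), c.length = member.length →
    dfsB n member ans k v c
      = ((PySem.List.combinations (PySem.List.pyRange v (n + 1) 1) k).countP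
          (fun comb => decide (FB member c comb = ans)) : Int) := by
  intro k
  induction k with
  | zero =>
      intro v c hc
      rw [dfsB]
      by_cases hpr : (c.zip ans).any (fun p => decide (p.1 > p.2)) = true
      · have hne : ¬ c = ans := by
          simpa [FB] using prune_kills member ans c [] hc hpr
        rw [if_pos hpr, PySem.List.combinations_zero]
        simp [FB, hne]
      · rw [if_neg hpr, PySem.List.combinations_zero]
        simp only [FB]
        by_cases h : c = ans <;> simp [h]
  | succ k ih =>
      intro v c hc
      rw [dfsB]
      by_cases hpr : (c.zip ans).any (fun p => decide (p.1 > p.2)) = true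
      · simp only [hpr, if_true]
        have : ∀ comb ∈ PySem.List.combinations (PySem.List.pyRange v (n + 1) 1) (k + 1),
            ¬ (fun comb => decide (FB member c comb = ans)) comb = true := by
          intro comb _
          simpa using prune_kills member ans c comb hc hpr
        rw [List.countP_eq_zero.mpr this]
        simp
      · simp only [hpr]
        have hfold := PySem.List.foldl_add
          (l := PySem.List.pyRange v (n + 1) 1)
          (g := fun w => dfsB n member ans k (w + 1) (ovB member c w)) (a := 0)
        rw [show (fun total w => total + dfsB n member ans k (w + 1)
              ((c.zip member).map (fun p => p.1 + if PySem.Set.contains p.2 w then 1 else 0)))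
            = (fun total w => total + dfsB n member ans k (w + 1) (ovB member c w)) from rfl]
        rw [hfold, zero_add]
        have hmap : (PySem.List.pyRange v (n + 1) 1).map
              (fun w => dfsB n member ans k (w + 1) (ovB member c w))
            = (PySem.List.pyRange v (n + 1) 1).map
              (fun w => (((PySem.List.combinations (PySem.List.pyRange (w + 1) (n + 1) 1) k).countP
                (fun comb => decide (FB member (ovB member c w) comb = ans)) : Nat) : Int)) := by
          apply List.map_congr_left
          intro w _
          exact ih (w + 1) (ovB member c w) (length_ovB member c w hc)
        rw [hmap]
        rw [sum_map_cast]
        rw [countP_comb_split n k (fun comb => decide (FB member c comb = ans))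
          ((n + 1 - v).toNat) v (le_refl _)]
        rfl

-- ===== the A side (reused characterisations) =====

-- A's per-query overlap count
def cntA (arrComb : List Int) (q : List (List Int)) (t : Int) : Int :=
  PySem.Set.len (PySem.Set.inter (PySem.Set.ofList arrComb)
    (PySem.Set.ofList (PySem.List.pyGetD q t [])))

-- what A's inner loop decides
theorem solInner_iff (arrComb : List Int) (q : List (List Int)) :
    ∀ (rest : List Int) (i : Int),
    (solInner arrComb q i rest = true
      ↔ ∀ p : Nat, (hp : p < rest.length) → cntA arrComb q (i + p) = rest[p]) := by
  intro rest
  induction rest with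
  | nil =>
      intro i
      constructor
      · intro _ p hp; simp at hp
      · intro _; rfl
  | cons a rest ih =>
      intro i
      rw [solInner]
      by_cases hc : cntA arrComb q i = a
      · have : ¬ (PySem.Set.len (PySem.Set.inter (PySem.Set.ofList arrComb)
            (PySem.Set.ofList (PySem.List.pyGetD q i []))) ≠ a) := by
          simpa [cntA] using hc
        rw [if_neg this, ih (i + 1)]
        constructor
        · intro h p hp
          cases p with
          | zero => simpa using hc
          | succ p' =>
              have := h p' (by simpa using Nat.lt_of_succ_lt_succ hp)
              simpa [add_assoc, add_comm, add_left_comm] using this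
        · intro h p hp
          have := h (p + 1) (by simpa using Nat.succ_lt_succ hp)
          simpa [add_assoc, add_comm, add_left_comm] using this
      · have : (PySem.Set.len (PySem.Set.inter (PySem.Set.ofList arrComb)
            (PySem.Set.ofList (PySem.List.pyGetD q i []))) ≠ a) := by
          simpa [cntA] using hc
        rw [if_pos this]
        constructor
        · intro h; cases h
        · intro h
          exact absurd (by simpa using h 0 (by simp)) hc

-- A's count as a countP over the (nodup) combination
theorem cntA_eq_countP (arrComb : List Int) (hnd : arrComb.Nodup) (q : List (List Int)) (t : Int) :
    cntA arrComb q t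
      = ((arrComb.countP (fun v => decide (v ∈ PySem.List.pyGetD q t []))) : Int) := by
  unfold cntA
  rw [PySem.Set.ofList_eq_self_of_nodup _ hnd]
  have : PySem.Set.inter arrComb (PySem.Set.ofList (PySem.List.pyGetD q t []))
      = arrComb.filter (fun v => PySem.Set.contains (PySem.Set.ofList (PySem.List.pyGetD q t [])) v) := rfl
  rw [this]
  have hfe : arrComb.filter (fun v => PySem.Set.contains (PySem.Set.ofList (PySem.List.pyGetD q t [])) v)
      = arrComb.filter (fun v => decide (v ∈ PySem.List.pyGetD q t [])) := by
    apply List.filter_congr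
    intro v _
    simp [PySem.Set.mem_ofList]
  rw [hfe]
  have : PySem.Set.len (arrComb.filter (fun v => decide (v ∈ PySem.List.pyGetD q t [])))
      = ((arrComb.filter (fun v => decide (v ∈ PySem.List.pyGetD q t []))).length : Int) := rfl
  rw [this, List.countP_eq_length_filter]

-- per (nodup) combination, with ans not longer than q: A's flag equals B's vector test
theorem flag_iff (q : List (List Int)) (ans : List Int) (hq : ans.length ≤ q.length)
    (comb : List Int) (hnd : comb.Nodup) :
    (solInner comb q 0 ans = true
      ↔ FB ((PySem.List.slice q none (some (ans.length : Int))).map PySem.Set.ofList)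
          (List.replicate ((PySem.List.slice q none (some (ans.length : Int))).map PySem.Set.ofList).length 0)
          comb = ans) := by
  set m := ans.length with hm
  have hslice : PySem.List.slice q none (some (m : Int)) = q.take m :=
    PySem.List.slice_to_natCast q m
  set member := (PySem.List.slice q none (some (m : Int))).map PySem.Set.ofList with hmem
  have hlenM : member.length = m := by
    rw [hmem, hslice]; simp [List.length_take]; omega
  have hc : (List.replicate member.length (0 : Int)).length = member.length := by simp
  have hs := FB_spec member comb (List.replicate member.length 0) hc
  have hMj : ∀ j : Nat, j < m → member.getD j [] = PySem.Set.ofList (q.getD j []) := by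
    intro j hj
    rw [hmem, hslice]
    have hjq : j < q.length := by omega
    have hjt : j < (q.take m).length := by simp [List.length_take]; omega
    simp [List.getD, hjq, List.getElem_take, hj]
  have hentry : ∀ j : Nat, j < m →
      (FB member (List.replicate member.length 0) comb).getD j 0 = cntA comb q j := by
    intro j hj
    rw [hs.2 j (by omega)]
    have hrep : (List.replicate member.length (0 : Int)).getD j 0 = 0 := by
      simp [List.getD, hlenM, hj]
    rw [hrep, zero_add, cntA_eq_countP comb hnd q j]
    congr 1
    apply List.countP_congr
    intro x _
    have hjq : j < q.length := by omega
    rw [hMj j hj]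
    have : PySem.List.pyGetD q (j : Int) [] = q.getD j [] := by
      simp [PySem.List.pyGetD_natCast, List.getD]
    rw [this]
    simp [PySem.Set.mem_ofList]
  rw [solInner_iff]
  constructor
  · intro h
    apply List.ext_getElem (by rw [hs.1, hlenM])
    intro j hj1 hj2
    have hjm : j < m := by rw [hs.1, hlenM] at hj1; exact hj1
    have he := hentry j hjm
    rw [List.getD_eq_getElem?_getD, List.getElem?_eq_getElem hj1] at he
    simp only [Option.getD_some] at he
    rw [he]
    simpa using h j hj2
  · intro h j hj
    have hjm : j < m := hj
    have he := hentry j hjm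
    rw [h] at he
    rw [List.getD_eq_getElem?_getD, List.getElem?_eq_getElem hj] at he
    simp only [Option.getD_some] at he
    simpa using he.symm

-- ===== VERDICT (by name: the statement is the Claim_ definition above) =====
theorem solution_spec : Claim_equal_solution := by
  intro n q ans _ hpre
  unfold Spec_solution solution solution_alt
  set member := (PySem.List.slice q none (some (ans.length : Int))).map PySem.Set.ofList with hmem
  rw [PySem.List.foldl_if_add_one (p := fun comb => solInner comb q 0 ans)]
  rw [dfsB_eq n member ans 5 1 (List.replicate member.length 0) (by simp)]
  rw [zero_add]
  congr 1
  by_cases hq : ans.length ≤ q.length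
  · apply List.countP_congr
    intro comb hcomb
    have hsub := (PySem.List.mem_combinations_iff _ _ _).mp hcomb
    have hnd : comb.Nodup := hsub.1.nodup (PySem.List.nodup_pyRange_one 1 (n + 1))
    have := flag_iff q ans hq comb hnd
    rw [← hmem] at this
    by_cases h : solInner comb q 0 ans = true
    · simp [h, this.mp h]
    · have h' := this.not.mp h
      simp only [h]
      simp at h h' ⊢
      exact fun hx => absurd hx h'
  · have hn : n < 5 := hpre.resolve_left hq
    have hlen : (PySem.List.pyRange 1 (n + 1) 1).length < 5 := by
      rw [PySem.List.length_pyRange_one]; omega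
    rw [PySem.List.combinations_eq_nil_of_length_lt _ hlen]
    simp
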